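-- pv_equiv track=rewrite | github.com/Cgamess/RPIhat-game | gamefuncts.py | makealtani
-- ===== SOURCE A (Python) =====
-- def creatempty(lenl,value=None):
--     a = list(range(lenl))
--     for i in range(len(a)):
--         a[i]=value
--     return a
--
-- def createalt(lenl, valuelist=[]):
--     a = []
--     for i in range(lenl):
--         a.extend(valuelist)
--     return a
--
-- def makealtani(loops,wait,alts,lenl=1):
--     a=[]
--     for i in range(loops):
--         for j in createalt(lenl,alts):
--             a.append(creatempty(wait,j))
--     b=[]
--     for i in a:
--         b.extend(i)
--     return(b)
-- ===== SOURCE B (Python) =====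
-- def makealtani(loops, wait, alts, lenl=1):
--     reps = max(loops, 0) * max(lenl, 0)
--     if reps == 0:
--         return []
--     base = []
--     for j in alts:
--         base += [j] * wait
--     return base * reps
-- ===== Notes on version B (the rewrite author's own statement) =====
-- stated objective: simpler
-- what changed: B builds a single period with one pass over alts ([j]*wait per element) and replicates it by list multiplication (base * reps with reps = max(loops,0)*max(lenl,0), returning [] when reps is 0), eliminating A's intermediate list-of-lists, its helper functions and the separate flatten loop.
import Mathlib
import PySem

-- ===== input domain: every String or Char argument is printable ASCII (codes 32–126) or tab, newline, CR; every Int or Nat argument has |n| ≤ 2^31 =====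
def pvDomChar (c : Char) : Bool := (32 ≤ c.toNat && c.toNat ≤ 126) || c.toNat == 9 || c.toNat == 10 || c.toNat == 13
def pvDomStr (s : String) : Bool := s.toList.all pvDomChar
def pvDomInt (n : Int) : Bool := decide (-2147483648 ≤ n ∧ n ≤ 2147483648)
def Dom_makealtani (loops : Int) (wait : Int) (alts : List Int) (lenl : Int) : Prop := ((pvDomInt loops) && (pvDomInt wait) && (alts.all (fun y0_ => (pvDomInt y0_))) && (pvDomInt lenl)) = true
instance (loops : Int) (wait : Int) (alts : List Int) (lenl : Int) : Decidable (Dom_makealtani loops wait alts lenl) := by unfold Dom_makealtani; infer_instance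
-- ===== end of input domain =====

-- B builds one period in a single pass and replicates it with list multiplication,
-- dropping A's list-of-lists and flatten step; objective: simpler (not measurably faster here).

-- ===== PORT A =====
-- creatempty: a = list(range(lenl)); then every slot i is overwritten with value
def creatempty (lenl : Int) (value : Int) : List Int :=
  (PySem.List.pyRange 0 lenl 1).map (fun _ => value)

-- createalt: a = []; for i in range(lenl): a.extend(valuelist)
def createalt (lenl : Int) (valuelist : List Int) : List Int :=
  (PySem.List.pyRange 0 lenl 1).foldl (fun a _ => a ++ valuelist) []

def makealtani (loops : Int) (wait : Int) (alts : List Int) (lenl : Int) : List Int :=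
  let a : List (List Int) :=
    (PySem.List.pyRange 0 loops 1).foldl
      (fun a _ => (createalt lenl alts).foldl (fun a j => a ++ [creatempty wait j]) a) []
  let b : List Int := a.foldl (fun b i => b ++ i) []
  b

-- ===== PORT B =====
-- Python list * int (n copies, empty for n ≤ 0)
def pyMulList (xs : List Int) (n : Int) : List Int :=
  (List.replicate n.toNat xs).flatten

def makealtani_alt (loops : Int) (wait : Int) (alts : List Int) (lenl : Int) : List Int :=
  let reps := max loops 0 * max lenl 0
  if reps = 0 then []
  else
    let base := alts.foldl (fun b j => b ++ pyMulList [j] wait) []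
    pyMulList base reps

-- ===== PRECONDITION & SPEC =====
def Spec_makealtani (loops : Int) (wait : Int) (alts : List Int) (lenl : Int) (out : List Int) : Prop := out = makealtani_alt loops wait alts lenl
instance (loops : Int) (wait : Int) (alts : List Int) (lenl : Int) (out : List Int) : Decidable (Spec_makealtani loops wait alts lenl out) := by unfold Spec_makealtani; infer_instance

-- ===== CLAIM (what is proved, stated in full; the proofs are below) =====
def Claim_equal_makealtani : Prop := ∀ (loops : Int) (wait : Int) (alts : List Int) (lenl : Int), Dom_makealtani loops wait alts lenl → Spec_makealtani loops wait alts lenl (makealtani loops wait alts lenl)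

-- ===== LEMMAS AND PROOFS =====

-- a fold that appends the same list on every step is replicate-and-flatten
theorem foldl_append_const {α β : Type} (L : List α) (v : List β) (init : List β) :
    L.foldl (fun a _ => a ++ v) init = init ++ (List.replicate L.length v).flatten := by
  induction L generalizing init with
  | nil => simp
  | cons x xs ih => simp [List.foldl_cons, ih, List.replicate_succ, List.append_assoc]

theorem map_const_range {α : Type} (n : Nat) (v : α) :
    (List.range n).map (fun _ => v) = List.replicate n v := by
  induction n with
  | zero => rfl
  | succ k ih => simp [List.range_succ, ih, List.replicate_succ']

theorem creatempty_eq (wait value : Int) :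
    creatempty wait value = List.replicate wait.toNat value := by
  rw [creatempty, PySem.List.pyRange_one, List.map_map]
  simp only [Function.comp_def, Int.sub_zero]
  exact map_const_range _ _

theorem createalt_eq (lenl : Int) (v : List Int) :
    createalt lenl v = (List.replicate lenl.toNat v).flatten := by
  rw [createalt, foldl_append_const]
  simp [PySem.List.length_pyRange_one]

theorem flatten_replicate_flatten {α : Type} (m n : Nat) (xs : List α) :
    (List.replicate m (List.replicate n xs).flatten).flatten
      = (List.replicate (m * n) xs).flatten := by
  induction m with
  | zero => simp
  | succ k ih =>
      rw [List.replicate_succ, List.flatten_cons, ih, Nat.succ_mul, Nat.add_comm,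
        List.replicate_add, List.flatten_append]

theorem flatten_replicate_singleton {α : Type} (n : Nat) (x : α) :
    (List.replicate n [x]).flatten = List.replicate n x := by
  induction n with
  | zero => rfl
  | succ k ih => simp [List.replicate_succ, ih]

theorem flatMap_flatten_replicate (n : Nat) (xs : List Int) (f : Int → List Int) :
    ((List.replicate n xs).flatten).flatMap f
      = (List.replicate n (xs.flatMap f)).flatten := by
  induction n with
  | zero => simp
  | succ k ih => simp [List.replicate_succ, ih]

theorem base_eq (wait : Int) (alts : List Int) :
    alts.foldl (fun b j => b ++ pyMulList [j] wait) []
      = alts.flatMap (fun j => List.replicate wait.toNat j) := by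
  simp only [pyMulList]
  rw [PySem.List.foldl_append_eq_flatMap]
  simp only [List.nil_append]
  congr 1
  funext j
  exact flatten_replicate_singleton _ _

theorem makealtani_eq (loops wait : Int) (alts : List Int) (lenl : Int) :
    makealtani loops wait alts lenl
      = (List.replicate (loops.toNat * lenl.toNat)
          (alts.flatMap fun j => List.replicate wait.toNat j)).flatten := by
  have hinner : ∀ (acc : List (List Int)),
      (createalt lenl alts).foldl (fun a j => a ++ [creatempty wait j]) acc
        = acc ++ (createalt lenl alts).map (creatempty wait) :=
    fun acc => PySem.List.foldl_append_singleton_eq_map _ _ _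
  unfold makealtani
  simp only [hinner]
  rw [foldl_append_const, PySem.List.foldl_append_eq_flatMap]
  simp only [List.nil_append, List.flatMap_id', PySem.List.length_pyRange_one, Int.sub_zero]
  rw [List.flatten_flatten, List.map_replicate]
  have hP : ((createalt lenl alts).map (creatempty wait)).flatten
      = (List.replicate lenl.toNat (alts.flatMap fun j => List.replicate wait.toNat j)).flatten := by
    have hc : creatempty wait = fun j => List.replicate wait.toNat j :=
      funext (creatempty_eq wait)
    simp only [hc, createalt_eq, ← List.flatMap_def]
    exact flatMap_flatten_replicate _ _ _
  rw [hP, flatten_replicate_flatten]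

theorem makealtani_spec' (loops wait : Int) (alts : List Int) (lenl : Int) :
    makealtani loops wait alts lenl = makealtani_alt loops wait alts lenl := by
  have hm : max loops 0 * max lenl 0 = ((loops.toNat * lenl.toNat : Nat) : Int) := by
    rw [← Int.ofNat_toNat loops, ← Int.ofNat_toNat lenl]
    push_cast
    ring
  rw [makealtani_eq]
  unfold makealtani_alt
  by_cases h : max loops 0 * max lenl 0 = 0
  · have h0 : loops.toNat * lenl.toNat = 0 := by
      rw [hm] at h
      exact_mod_cast h
    simp [h, h0]
  · rw [if_neg h, base_eq, pyMulList, hm, Int.toNat_natCast]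

-- ===== VERDICT (by name: the statement is the Claim_ definition above) =====
theorem makealtani_spec : Claim_equal_makealtani := by
  intro loops wait alts lenl _
  unfold Spec_makealtani
  exact makealtani_spec' loops wait alts lenl
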